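-- pv_equiv track=rewrite | github.com/adioby/MyChains | block.py | Trouver_Car_Debut_Block
-- ===== SOURCE A (Python) =====
-- def Trouver_Car_Debut_Block(chaine) :
--     ch = str(chaine)
--     n = len(ch)
--     x0 = "([{"
--
--     for i in range(n):
--         x = ch[i]
--         if x != "" :
--             if x in x0 :
--                 return x
-- ===== SOURCE B (Python) =====
-- def Trouver_Car_Debut_Block(chaine):
--     ch = str(chaine)
--     positions = [p for p in (ch.find(c) for c in "([{") if p != -1]
--     if not positions:
--         return None
--     return ch[min(positions)]
-- ===== Notes on version B (the rewrite author's own statement) =====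
-- stated objective: faster
-- what changed: A's Python-level character-by-character scan with a membership test is replaced by three C-level str.find() scans (one per opening bracket) whose valid first-occurrence indices are reduced by min(), indexing back into the string.
import Mathlib
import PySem

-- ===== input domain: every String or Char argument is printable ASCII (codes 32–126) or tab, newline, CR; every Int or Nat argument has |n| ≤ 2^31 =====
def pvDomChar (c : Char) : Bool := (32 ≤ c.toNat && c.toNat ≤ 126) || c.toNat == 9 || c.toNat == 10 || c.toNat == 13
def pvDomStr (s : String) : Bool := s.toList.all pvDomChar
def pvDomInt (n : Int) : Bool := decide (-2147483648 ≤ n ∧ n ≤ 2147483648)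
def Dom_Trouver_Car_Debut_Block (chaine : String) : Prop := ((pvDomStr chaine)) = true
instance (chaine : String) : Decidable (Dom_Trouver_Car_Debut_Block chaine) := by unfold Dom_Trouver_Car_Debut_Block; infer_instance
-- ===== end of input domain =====

-- B replaces A's single character-by-character scan with three library find() scans
-- (one per opening bracket) followed by a minimum-index selection (measured faster by a constant factor).

-- ===== PORT A =====
-- A's for-loop over ch[i] for i in range(n), with its (always-true) `x != ""` test kept.
def TCDB_loopA : List Char → Option String
  | [] => none
  | x :: rest =>
    if ([x] : List Char) ≠ [] then
      if PySem.Chars.isIn [x] ['(', '[', '{'] then some (String.ofList [x])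
      else TCDB_loopA rest
    else TCDB_loopA rest

def Trouver_Car_Debut_Block (chaine : String) : Option String :=
  TCDB_loopA chaine.toList

-- ===== PORT B =====
def Trouver_Car_Debut_Block_alt (chaine : String) : Option String :=
  let cs := chaine.toList
  let positions := (['(', '[', '{'].map (fun c => PySem.Chars.find cs [c])).filter (fun p => p ≠ -1)
  match positions.min? with
  | none => none
  | some m => (PySem.List.pyGet? cs m).map (fun c => String.ofList [c])

-- ===== PRECONDITION & SPEC =====
def Spec_Trouver_Car_Debut_Block (chaine : String) (out : Option String) : Prop := out = Trouver_Car_Debut_Block_alt chaine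
instance (chaine : String) (out : Option String) : Decidable (Spec_Trouver_Car_Debut_Block chaine out) := by unfold Spec_Trouver_Car_Debut_Block; infer_instance

-- ===== CLAIM (what is proved, stated in full; the proofs are below) =====
def Claim_equal_Trouver_Car_Debut_Block : Prop := ∀ (chaine : String), Dom_Trouver_Car_Debut_Block chaine → Spec_Trouver_Car_Debut_Block chaine (Trouver_Car_Debut_Block chaine)

-- ===== LEMMAS AND PROOFS =====

-- body of B's port as a function of the character list
def TCDB_bodyB (cs : List Char) : Option String :=
  match ((['(', '[', '{'].map (fun c => PySem.Chars.find cs [c])).filter (fun p => p ≠ -1)).min? with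
  | none => none
  | some m => (PySem.List.pyGet? cs m).map (fun c => String.ofList [c])

lemma TCDB_altB (chaine : String) : Trouver_Car_Debut_Block_alt chaine = TCDB_bodyB chaine.toList := rfl

lemma TCDB_singleton_prefix (c : Char) (l : List Char) : [c] <+: l ↔ ∃ t, l = c :: t := by
  cases l with
  | nil => simp
  | cons x t => simp [List.cons_prefix_cons, eq_comm]

lemma TCDB_find_neg (c : Char) (l : List Char) (h : c ∉ l) : PySem.Chars.find l [c] = -1 := by
  rw [PySem.Chars.find_eq_neg_one_iff, List.singleton_infix_iff]; exact h

-- the cons recurrence for find with a single-character needle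
lemma TCDB_find_cons (x c : Char) (cs : List Char) :
    PySem.Chars.find (x :: cs) [c] =
      if x = c then 0
      else if PySem.Chars.find cs [c] = -1 then -1 else PySem.Chars.find cs [c] + 1 := by
  by_cases hxc : x = c
  · subst hxc
    have h0 : (0:Int) ≤ PySem.Chars.find (x :: cs) [x] := by
      rw [PySem.Chars.find_nonneg_iff, List.singleton_infix_iff]; exact List.mem_cons_self
    obtain ⟨hp, hmin⟩ := PySem.Chars.find_spec h0
    have ht : (PySem.Chars.find (x :: cs) [x]).toNat = 0 := by
      by_contra hne
      exact hmin 0 (Nat.pos_of_ne_zero hne) (by rw [List.drop_zero]; exact ⟨cs, rfl⟩)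
    rw [if_pos rfl]; omega
  · simp only [if_neg hxc]
    by_cases hmem : c ∈ cs
    · have hr0 : (0:Int) ≤ PySem.Chars.find cs [c] := by
        rw [PySem.Chars.find_nonneg_iff, List.singleton_infix_iff]; exact hmem
      have hu0 : (0:Int) ≤ PySem.Chars.find (x :: cs) [c] := by
        rw [PySem.Chars.find_nonneg_iff, List.singleton_infix_iff]; exact List.mem_cons_of_mem _ hmem
      obtain ⟨hrp, hrmin⟩ := PySem.Chars.find_spec hr0
      obtain ⟨hup, humin⟩ := PySem.Chars.find_spec hu0
      set r := PySem.Chars.find cs [c] with hrdef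
      set u := PySem.Chars.find (x :: cs) [c] with hudef
      have hune : u.toNat ≠ 0 := by
        intro h0'
        rw [h0'] at hup
        rw [List.drop_zero, TCDB_singleton_prefix] at hup
        obtain ⟨t, ht⟩ := hup
        exact hxc (List.cons.injEq .. ▸ ht |>.1)
      obtain ⟨k, hk⟩ : ∃ k, u.toNat = k + 1 := ⟨u.toNat - 1, by omega⟩
      have hck : [c] <+: cs.drop k := by
        have := hup; rw [hk, List.drop_succ_cons] at this; exact this
      have h1 : r.toNat ≤ k := by
        by_contra h
        exact hrmin k (by omega) hck
      have h2 : u.toNat ≤ r.toNat + 1 := by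
        by_contra h
        exact humin (r.toNat + 1) (by omega) (by rw [List.drop_succ_cons]; exact hrp)
      have : u = r + 1 := by omega
      rw [this, if_neg (by omega)]
    · have h1 : PySem.Chars.find cs [c] = -1 := TCDB_find_neg c cs hmem
      have h2 : PySem.Chars.find (x :: cs) [c] = -1 :=
        TCDB_find_neg c _ (by simp [hmem]; exact fun h => hxc h.symm)
      rw [h1, h2, if_pos rfl]

lemma TCDB_find_ge (c : Char) (l : List Char) : -1 ≤ PySem.Chars.find l [c] :=
  PySem.Chars.neg_one_le_find l [c]

lemma TCDB_pyGet_cons_succ (x : Char) (cs : List Char) (m : Int) (hm : 0 ≤ m) :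
    PySem.List.pyGet? (x :: cs) (m + 1) = PySem.List.pyGet? cs m := by
  unfold PySem.List.pyGet? PySem.List.pyIdx?
  simp only [List.length_cons]
  have ht : (m + 1).toNat = m.toNat + 1 := by omega
  split_ifs <;> try omega
  · simp [ht]
  · rfl


-- min of a list shifted by one
lemma TCDB_foldl_min_add_one (xs : List Int) (a : Int) :
    (xs.map (fun y => y + 1)).foldl min (a + 1) = xs.foldl min a + 1 := by
  induction xs generalizing a with
  | nil => rfl
  | cons x xs ih =>
    simp only [List.map_cons, List.foldl_cons]
    rw [show min (a + 1) (x + 1) = min a x + 1 by omega, ih]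

lemma TCDB_min?_map_add_one (xs : List Int) :
    (xs.map (fun y => y + 1)).min? = xs.min?.map (fun y => y + 1) := by
  cases xs with
  | nil => rfl
  | cons x xs => simp [List.min?, TCDB_foldl_min_add_one]

-- filtering -1 out of a shifted list = shifting the filtered list
lemma TCDB_filter_shift (l : List Int) (hge : ∀ y ∈ l, -1 ≤ y) :
    ((l.map (fun y => if y = -1 then -1 else y + 1)).filter (fun p => p ≠ -1)) =
      (l.filter (fun p => p ≠ -1)).map (fun y => y + 1) := by
  induction l with
  | nil => rfl
  | cons y l ih =>
    have hy1 : -1 ≤ y := hge y List.mem_cons_self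
    have ihl := ih (fun z hz => hge z (List.mem_cons_of_mem _ hz))
    by_cases hy : y = -1
    · simpa [hy, List.filter] using ihl
    · have hne : y + 1 ≠ -1 := by omega
      simpa [List.filter, hy, hne] using ihl

lemma TCDB_min?_zero (L : List Int) (h0 : 0 ∈ L) (hge : ∀ y ∈ L, 0 ≤ y) :
    L.min? = some 0 := by
  cases hm : L.min? with
  | none => rw [List.min?_eq_none_iff] at hm; simp [hm] at h0
  | some m =>
    rw [List.min?_eq_some_iff] at hm
    have := hge m hm.1
    have := hm.2 0 h0
    congr 1; omega

-- membership bound for B's positions list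
lemma TCDB_pos_ge (cs : List Char) (p : Int)
    (hp : p ∈ (['(', '[', '{'].map (fun c => PySem.Chars.find cs [c])).filter (fun q => q ≠ -1)) :
    0 ≤ p := by
  have := List.of_mem_filter hp
  have hmem := List.mem_of_mem_filter hp
  simp only [List.mem_map] at hmem
  obtain ⟨c, -, hc⟩ := hmem
  have := TCDB_find_ge c cs
  simp at *
  omega

lemma TCDB_main (cs : List Char) : TCDB_loopA cs = TCDB_bodyB cs := by
  induction cs with
  | nil => rfl
  | cons x cs ih =>
    by_cases hx : x ∈ (['(', '[', '{'] : List Char)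
    · have hin : PySem.Chars.isIn [x] ['(', '[', '{'] = true := by
        rw [PySem.Chars.isIn_iff_infix, List.singleton_infix_iff]; exact hx
      have hA : TCDB_loopA (x :: cs) = some (String.ofList [x]) := by
        simp [TCDB_loopA, hin]
      -- 0 occurs among the filtered positions, and all of them are ≥ 0
      have h0mem : (0 : Int) ∈ (['(', '[', '{'].map
          (fun c => PySem.Chars.find (x :: cs) [c])).filter (fun q => q ≠ -1) := by
        apply List.mem_filter_of_mem
        · simp only [List.mem_map]
          exact ⟨x, hx, by rw [TCDB_find_cons, if_pos rfl]⟩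
        · decide
      have hmin : ((['(', '[', '{'].map
          (fun c => PySem.Chars.find (x :: cs) [c])).filter (fun q => q ≠ -1)).min? = some 0 :=
        TCDB_min?_zero _ h0mem (fun y hy => TCDB_pos_ge (x :: cs) y hy)
      rw [hA]
      unfold TCDB_bodyB
      rw [hmin]
      simp [PySem.List.pyGet?, PySem.List.pyIdx?]
    · have hin : PySem.Chars.isIn [x] ['(', '[', '{'] = false := by
        rw [PySem.Chars.isIn_eq_false_iff, List.singleton_infix_iff]; exact hx
      have hA : TCDB_loopA (x :: cs) = TCDB_loopA cs := by
        simp [TCDB_loopA, hin]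
      rw [hA, ih]
      -- each find on x :: cs is the shifted find on cs
      have hshift : (['(', '[', '{'].map (fun c => PySem.Chars.find (x :: cs) [c])) =
          (['(', '[', '{'].map (fun c => PySem.Chars.find cs [c])).map
            (fun y => if y = -1 then -1 else y + 1) := by
        simp only [List.map_cons, List.map_nil]
        obtain ⟨h1, h2, h3⟩ : ¬x = '(' ∧ ¬x = '[' ∧ ¬x = '{' := by simpa using hx
        rw [TCDB_find_cons, TCDB_find_cons, TCDB_find_cons,
          if_neg h1, if_neg h2, if_neg h3]
      unfold TCDB_bodyB
      rw [hshift, TCDB_filter_shift _ (by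
        intro y hy
        simp only [List.mem_map, List.mem_cons] at hy
        obtain ⟨c, -, rfl⟩ := hy
        exact TCDB_find_ge c cs), TCDB_min?_map_add_one]
      cases hm : ((['(', '[', '{'].map (fun c => PySem.Chars.find cs [c])).filter
          (fun q => q ≠ -1)).min? with
      | none => rfl
      | some m =>
        have hm0 : 0 ≤ m := TCDB_pos_ge cs m (List.min?_mem hm)
        simp only [Option.map_some]
        rw [TCDB_pyGet_cons_succ x cs m hm0]

-- ===== VERDICT (by name: the statement is the Claim_ definition above) =====
theorem Trouver_Car_Debut_Block_spec : Claim_equal_Trouver_Car_Debut_Block := by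
  intro chaine _
  unfold Spec_Trouver_Car_Debut_Block
  rw [TCDB_altB]
  exact TCDB_main chaine.toList
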